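-- pv_equiv track=rewrite | github.com/kurtrm/phone_network_graph | src/tmobile_bill_parser.py | _parse_continuous_records
-- ===== SOURCE A (Python) =====
-- def _parse_continuous_records(prepared_page, section_dict):
--     """Handle parsing a continuous list of records."""
--     # import pdb; pdb.set_trace()
--     columns = 6
--     start = prepared_page.index('Date and time')
--     for i, column in enumerate(prepared_page[start:start + columns]):
--         column_index = start + i
--         values = prepared_page[column_index + columns::columns]
--         if column in section_dict:
--             section_dict[column] = section_dict[column] + values
--         else:
--             section_dict[column] = values
--
--     return section_dict
-- ===== SOURCE B (Python) =====
-- def _parse_continuous_records(prepared_page, section_dict):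
--     """Handle parsing a continuous list of records."""
--     columns = 6
--     start = prepared_page.index('Date and time')
--     headers = prepared_page[start:start + columns]
--     # read the data region row by row, in chunks of 6, instead of strided slices
--     rows = [prepared_page[r:r + columns]
--             for r in range(start + columns, len(prepared_page), columns)]
--     for j, column in enumerate(headers):
--         values = [row[j] for row in rows if j < len(row)]
--         if column in section_dict:
--             section_dict[column] = section_dict[column] + values
--         else:
--             section_dict[column] = values
--     return section_dict
-- ===== Notes on version B (the rewrite author's own statement) =====
-- stated objective: alternative
-- what changed: B reads the data region row by row in chunks of 6 and picks column j out of each row, instead of A's per-column strided slices prepared_page[start+i+6::6]; the final dict-merge loop over the headers is kept identical.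
import Mathlib
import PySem

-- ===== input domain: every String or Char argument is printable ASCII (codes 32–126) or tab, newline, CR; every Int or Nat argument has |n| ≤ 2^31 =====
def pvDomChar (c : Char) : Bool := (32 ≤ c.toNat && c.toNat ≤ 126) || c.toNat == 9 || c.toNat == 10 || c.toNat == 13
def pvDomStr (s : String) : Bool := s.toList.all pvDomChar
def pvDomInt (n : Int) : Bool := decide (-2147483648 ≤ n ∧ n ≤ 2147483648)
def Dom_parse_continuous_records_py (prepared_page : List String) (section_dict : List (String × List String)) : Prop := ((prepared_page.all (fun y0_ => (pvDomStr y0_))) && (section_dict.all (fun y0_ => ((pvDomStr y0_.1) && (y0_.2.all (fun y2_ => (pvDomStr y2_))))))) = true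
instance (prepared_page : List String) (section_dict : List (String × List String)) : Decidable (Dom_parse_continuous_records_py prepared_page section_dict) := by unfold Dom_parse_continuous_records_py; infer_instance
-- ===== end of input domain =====

-- B parses the data region row by row in chunks of 6 (picking column j from each row) instead of A's
-- per-column strided slices; the dict-merge loop is unchanged (both mutate section_dict in Python;
-- the equivalence proved here is about the returned dict value).


-- ===== PORT A =====
def parse_continuous_records_py (prepared_page : List String) (section_dict : List (String × List String)) : List (String × List String) :=
  match PySem.List.index? prepared_page "Date and time" with
  | none => section_dict   -- Python raises ValueError here; excluded by Pre_
  | some start =>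
    ((PySem.List.enumerate (PySem.List.slice prepared_page (some (start : Int)) (some ((start : Int) + 6))) 0).foldl
      (fun d ic =>
        let column := ic.2
        let column_index : Int := (start : Int) + ic.1
        let values := (PySem.List.slice? prepared_page (some (column_index + 6)) none 6).getD []
        if d.contains column then d.insert column (d.getD column [] ++ values)
        else d.insert column values)
      (PySem.Dict.ofList section_dict)).items

-- ===== PORT B =====
def parse_continuous_records_py_alt (prepared_page : List String) (section_dict : List (String × List String)) : List (String × List String) :=
  match PySem.List.index? prepared_page "Date and time" with
  | none => section_dict   -- Python raises ValueError here; excluded by Pre_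
  | some start =>
    let headers := PySem.List.slice prepared_page (some (start : Int)) (some ((start : Int) + 6))
    let rows := (PySem.List.pyRange ((start : Int) + 6) (prepared_page.length : Int) 6).map
        (fun r => PySem.List.slice prepared_page (some r) (some (r + 6)))
    ((PySem.List.enumerate headers 0).foldl
      (fun d jc =>
        let column := jc.2
        let values := (rows.filter (fun row => decide (jc.1 < (row.length : Int)))).map
            (fun row => (PySem.List.pyGet? row jc.1).getD "")
        if d.contains column then d.insert column (d.getD column [] ++ values)
        else d.insert column values)
      (PySem.Dict.ofList section_dict)).items

-- ===== PRECONDITION & SPEC =====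
-- Pre_ excludes exactly the pages without a 'Date and time' entry: A (and B) raise ValueError there.
def Pre_parse_continuous_records_py (prepared_page : List String) (section_dict : List (String × List String)) : Prop :=
  "Date and time" ∈ prepared_page
instance (prepared_page : List String) (section_dict : List (String × List String)) : Decidable (Pre_parse_continuous_records_py prepared_page section_dict) := by unfold Pre_parse_continuous_records_py; infer_instance
def pvWitness_parse_continuous_records_py : List String × (List (String × List String)) :=
  (["Date and time", "Place", "Number", "Type", "Minutes", "Charge", "d1", "p1", "n1", "t1", "m1", "c1"], [("Place", ["old"])])

def Spec_parse_continuous_records_py (prepared_page : List String) (section_dict : List (String × List String)) (out : List (String × List String)) : Prop := out = parse_continuous_records_py_alt prepared_page section_dict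
instance (prepared_page : List String) (section_dict : List (String × List String)) (out : List (String × List String)) : Decidable (Spec_parse_continuous_records_py prepared_page section_dict out) := by unfold Spec_parse_continuous_records_py; infer_instance

-- ===== CLAIM (what is proved, stated in full; the proofs are below) =====
def Claim_equal_parse_continuous_records_py : Prop := ∀ (prepared_page : List String) (section_dict : List (String × List String)), Dom_parse_continuous_records_py prepared_page section_dict → Pre_parse_continuous_records_py prepared_page section_dict → Spec_parse_continuous_records_py prepared_page section_dict (parse_continuous_records_py prepared_page section_dict)

-- ===== LEMMAS AND PROOFS =====

def every6 {α : Type} : List α → List α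
  | [] => []
  | x :: t => x :: every6 (t.drop 5)
termination_by xs => xs.length
decreasing_by simp [List.length_drop]

theorem pv_every6_eq {α : Type} (zs : List α) :
    every6 zs = (List.range ((zs.length + 5) / 6)).filterMap (fun k => zs[6*k]?) := by
  induction hL : zs.length using Nat.strong_induction_on generalizing zs with
  | _ L ih =>
  cases zs with
  | nil => simp [every6]
  | cons x t =>
    have hc : ((x :: t).length + 5) / 6 = ((t.drop 5).length + 5) / 6 + 1 := by
      simp [List.length_drop]; omega
    subst hL
    rw [every6, hc, List.range_succ_eq_map, List.filterMap_cons, List.filterMap_map]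
    simp only [List.getElem?_cons_zero, Nat.mul_zero]
    have hdrop : ∀ k : Nat, (x :: t)[6*(k+1)]? = (t.drop 5)[6*k]? := by
      intro k
      rw [show t.drop 5 = (x :: t).drop 6 from rfl, List.getElem?_drop]
      congr 1; omega
    rw [ih (t.drop 5).length (by simp [List.length_drop]) _ rfl]
    simp only [Function.comp]
    congr 1
    apply List.filterMap_congr
    intro k _; exact (hdrop k).symm

theorem pv_A_side {α : Type} (xs : List α) (m : Nat) :
    (PySem.List.slice? xs (some (m : Int)) none 6).getD [] = every6 (xs.drop m) := by
  rw [pv_every6_eq]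
  simp only [PySem.List.slice?, PySem.List.sliceIndices]
  norm_num
  have h0 : ¬ ((m:Int) < 0) := by omega
  simp only [h0, if_false]
  by_cases hml : m ≤ xs.length
  · have hmin : min (m:Int) xs.length = m := by omega
    rw [hmin]
    have hcount : (if (m:Int) < xs.length then (((xs.length:Int) - m + 6 - 1)/6).toNat else 0) = (xs.length - m + 5)/6 := by
      split_ifs with h <;> omega
    rw [hcount]
    apply List.filterMap_congr; intro k _
    rw [show ((m:Int) + 6*(k:Int)).toNat = m + 6*k by omega]
  · have hmin : min (m:Int) xs.length = (xs.length:Int) := by omega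
    rw [hmin]
    have : (xs.length - m + 5)/6 = 0 := by omega
    simp [this]

theorem pv_B_side {α : Type} (dflt : α) (zs : List α) (j : Nat) (hj : j < 6) :
    ((((List.range ((zs.length + 5) / 6)).map (fun k => (zs.drop (6 * k)).take 6)).filter
        (fun row => decide ((j : Int) < (row.length : Int)))).map
      (fun row => (PySem.List.pyGet? row (j : Int)).getD dflt)) = every6 (zs.drop j) := by
  induction hL : zs.length using Nat.strong_induction_on generalizing zs with
  | _ L ih =>
  cases zs with
  | nil => simp [every6]
  | cons x t =>
    subst hL
    have hc : ((x :: t).length + 5) / 6 = ((t.drop 5).length + 5) / 6 + 1 := by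
      simp [List.length_drop]; omega
    rw [hc, List.range_succ_eq_map, List.map_cons, List.map_map]
    have htail : ((List.range (((t.drop 5).length + 5) / 6)).map
        ((fun k => ((x :: t).drop (6 * k)).take 6) ∘ Nat.succ)) =
        (List.range (((t.drop 5).length + 5) / 6)).map (fun k => ((t.drop 5).drop (6 * k)).take 6) := by
      apply List.map_congr_left; intro k _
      simp only [Function.comp]
      rw [show t.drop 5 = (x :: t).drop 6 from rfl, List.drop_drop]
      congr 2; omega
    rw [htail]
    simp only [Nat.mul_zero, List.drop_zero, List.filter_cons]
    by_cases hjL : j < (x :: t).length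
    · have hcond : (decide ((j : Int) < ((((x :: t).take 6).length : Nat) : Int))) = true := by
        rw [decide_eq_true_eq]; simp only [List.length_take, List.length_cons]; push_cast; simp only [List.length_cons] at hjL; omega
      rw [hcond, if_pos rfl, List.map_cons]
      rw [ih (t.drop 5).length (by simp [List.length_drop]) _ rfl]
      have hget : (PySem.List.pyGet? ((x :: t).take 6) (j : Int)).getD dflt = (x :: t)[j] := by
        rw [PySem.List.pyGet?_natCast]
        rw [List.getElem?_eq_getElem (by simp only [List.length_take, List.length_cons]; simp only [List.length_cons] at hjL; omega)]
        simp only [Option.getD_some, List.getElem_take]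
      rw [hget, List.drop_eq_getElem_cons hjL, every6]
      congr 1
      rw [List.drop_drop, List.drop_drop, show j + 1 + 5 = (5 + j) + 1 by omega, List.drop_succ_cons]
    · have hcond : (decide ((j : Int) < ((((x :: t).take 6).length : Nat) : Int))) = false := by
        rw [decide_eq_false_iff_not]; simp only [List.length_take, List.length_cons]; push_cast; simp only [List.length_cons] at hjL; omega
      rw [hcond, if_neg (by simp)]
      have ht5 : t.drop 5 = [] := by
        apply List.drop_eq_nil_of_le
        simp at hjL ⊢; omega
      rw [ht5]
      have hzs : (x :: t).drop j = [] := by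
        apply List.drop_eq_nil_of_le; simp at hjL ⊢; omega
      rw [hzs]
      simp [every6]

theorem pv_mem_enumerate {α : Type} (xs : List α) (s : Int) (p : Int × α)
    (hp : p ∈ PySem.List.enumerate xs s) : ∃ k : Nat, p.1 = s + k ∧ k < xs.length := by
  induction xs generalizing s with
  | nil => simp [PySem.List.enumerate] at hp
  | cons x t ih =>
    rw [PySem.List.enumerate_cons, List.mem_cons] at hp
    rcases hp with h | h
    · exact ⟨0, by simp [h], by simp⟩
    · obtain ⟨k, hk1, hk2⟩ := ih (s + 1) h
      exact ⟨k + 1, by push_cast; omega, by simp; omega⟩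

-- ===== VERDICT (by name: the statement is the Claim_ definition above) =====
theorem parse_continuous_records_py_spec : Claim_equal_parse_continuous_records_py := by
  intro page sd _ hpre
  unfold Spec_parse_continuous_records_py
  cases hstart : PySem.List.index? page "Date and time" with
  | none =>
    exfalso
    have := (PySem.List.index?_isSome_iff page "Date and time").mpr hpre
    rw [hstart] at this; simp at this
  | some start =>
    unfold parse_continuous_records_py parse_continuous_records_py_alt
    rw [hstart]
    simp only []
    congr 1
    apply PySem.List.foldl_congr_mem
    intro d ic hic
    obtain ⟨k, hk1, hk2⟩ := pv_mem_enumerate _ _ _ hic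
    have hk6 : k < 6 := by
      rw [show ((start:Int) + 6) = ((start:Nat):Int) + ((6:Nat):Int) by norm_cast,
        PySem.List.slice_natCast_add] at hk2
      simp only [List.length_take] at hk2; omega
    rw [hk1, zero_add]
    have hv : (PySem.List.slice? page (some ((start : Int) + (k:Int) + 6)) none 6).getD []
        = ((((PySem.List.pyRange ((start : Int) + 6) (page.length : Int) 6).map
              (fun r => PySem.List.slice page (some r) (some (r + 6)))).filter
            (fun row => decide ((k : Int) < (row.length : Int)))).map
          (fun row => (PySem.List.pyGet? row (k : Int)).getD "")) := by
      have hrows : (PySem.List.pyRange ((start : Int) + 6) (page.length : Int) 6).map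
            (fun r => PySem.List.slice page (some r) (some (r + 6)))
          = (List.range (((page.drop (start + 6)).length + 5) / 6)).map
              (fun k' => ((page.drop (start + 6)).drop (6 * k')).take 6) := by
        rw [PySem.List.pyRange_of_pos _ _ (by norm_num), List.map_map]
        have hcnt : (if ((start:Int) + 6) < (page.length : Int) then
              (((page.length : Int) - ((start:Int) + 6) + 6 - 1) / 6).toNat else 0)
            = ((page.drop (start + 6)).length + 5) / 6 := by
          simp only [List.length_drop]; split_ifs with h <;> omega
        rw [hcnt]
        apply List.map_congr_left; intro k' _
        simp only [Function.comp]
        rw [show ((start:Int) + 6) + 6 * (k':Int) = ((start + 6 + 6 * k' : Nat) : Int) by push_cast; ring,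
          show ((start + 6 + 6 * k' : Nat) : Int) + 6 = ((start + 6 + 6 * k' : Nat) : Int) + ((6:Nat):Int) by norm_cast,
          PySem.List.slice_natCast_add, List.drop_drop]
      rw [hrows]
      rw [show (start : Int) + (k:Int) + 6 = ((start + k + 6 : Nat) : Int) by push_cast; ring]
      rw [pv_A_side, pv_B_side "" (page.drop (start + 6)) k hk6, List.drop_drop]
      congr 2; omega
    rw [hv]
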